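-- pv_equiv track=rewrite | github.com/ryan-w-s/humble-steam-key-redeemer | humblesteamkeysredeemer.py | valid_steam_key
-- ===== SOURCE A (Python) =====
-- def valid_steam_key(key):
--     # Steam keys are in the format of AAAAA-BBBBB-CCCCC
--     if not isinstance(key, str):
--         return False
--     key_parts = key.split("-")
--     return (
--         len(key) == 17
--         and len(key_parts) == 3
--         and all(len(part) == 5 for part in key_parts)
--     )
-- ===== SOURCE B (Python) =====
-- def valid_steam_key(key):
--     # Steam keys are in the format of AAAAA-BBBBB-CCCCC
--     if not isinstance(key, str):
--         return False
--     return (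
--         len(key) == 17
--         and key[5] == "-"
--         and key[11] == "-"
--         and key.count("-") == 2
--     )
-- ===== Notes on version B (the rewrite author's own statement) =====
-- stated objective: alternative
-- what changed: B validates the key positionally (length 17, hyphens at indices 5 and 11, exactly two hyphens overall) instead of splitting on the hyphen and measuring the resulting list of parts.
import Mathlib
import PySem

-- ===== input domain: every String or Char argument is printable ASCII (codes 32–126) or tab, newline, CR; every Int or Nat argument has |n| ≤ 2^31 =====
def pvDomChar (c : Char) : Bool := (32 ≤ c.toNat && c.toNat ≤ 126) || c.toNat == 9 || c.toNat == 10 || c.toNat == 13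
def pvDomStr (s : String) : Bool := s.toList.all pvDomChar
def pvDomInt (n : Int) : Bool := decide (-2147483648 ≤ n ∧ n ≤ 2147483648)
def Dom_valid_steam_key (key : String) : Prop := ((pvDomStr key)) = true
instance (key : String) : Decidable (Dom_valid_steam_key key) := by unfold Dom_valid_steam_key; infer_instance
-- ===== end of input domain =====

-- B validates the Steam key positionally (length 17, hyphens at indices 5 and 11, exactly two hyphens)
-- instead of splitting on the hyphen and measuring the list of parts: an alternative decomposition, same cost.


-- ===== PORT A =====
-- key.split with the nonempty one-character literal separator is PySem.Chars.splitOn on the code points.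
def valid_steam_key (key : String) : Bool :=
  let key_parts := PySem.Chars.splitOn key.toList ['-']
  (PySem.Str.len key == 17) && (key_parts.length == 3) &&
    key_parts.all (fun part => part.length == 5)

-- ===== PORT B =====
def valid_steam_key_alt (key : String) : Bool :=
  (PySem.Str.len key == 17) && (PySem.Str.pyGet? key 5 == some '-') &&
    (PySem.Str.pyGet? key 11 == some '-') && (PySem.Str.count key "-" == 2)

-- ===== PRECONDITION & SPEC =====
def Spec_valid_steam_key (key : String) (out : Bool) : Prop := out = valid_steam_key_alt key
instance (key : String) (out : Bool) : Decidable (Spec_valid_steam_key key out) := by unfold Spec_valid_steam_key; infer_instance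

-- ===== CLAIM (what is proved, stated in full; the proofs are below) =====
def Claim_equal_valid_steam_key : Prop := ∀ (key : String), Dom_valid_steam_key key → Spec_valid_steam_key key (valid_steam_key key)

-- ===== LEMMAS AND PROOFS =====

-- PySem's fueled splitter, on a one-character separator, is Mathlib's List.splitOn.
theorem pvSplitOn_go_singleton (c : Char) (fuel : Nat) :
    ∀ (l cur : List Char) (acc : List (List Char)), l.length ≤ fuel →
      PySem.Chars.splitOn.go [c] fuel l cur acc
        = acc.reverse ++ (l.splitOnP (· == c)).modifyHead (cur.reverse ++ ·) := by
  induction fuel with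
  | zero =>
    intro l cur acc h
    have : l = [] := List.length_eq_zero_iff.mp (Nat.le_zero.mp h)
    subst this
    simp [PySem.Chars.splitOn.go, List.splitOnP_nil]
  | succ n ih =>
    intro l cur acc h
    cases l with
    | nil => simp [PySem.Chars.splitOn.go, List.splitOnP_nil]
    | cons x rest =>
      simp only [PySem.Chars.splitOn.go, List.isPrefixOf, Bool.and_true,
        List.length_cons, List.length_nil, List.drop_succ_cons, List.drop_zero]
      by_cases hx : x = c
      · subst hx
        rw [if_pos (by simp)]
        rw [ih rest [] (cur.reverse :: acc) (by simpa using h)]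
        simp only [List.splitOnP_cons, beq_self_eq_true, if_true, List.reverse_cons,
          List.reverse_nil, List.nil_append, List.modifyHead_cons, List.append_assoc,
          List.cons_append]
        cases List.splitOnP (fun x_1 => x_1 == x) rest <;> simp
      · rw [if_neg (by simp [Ne.symm hx])]
        rw [ih rest (x :: cur) acc (by simpa using h)]
        rcases h' : rest.splitOnP (· == c) with _ | ⟨q, qs⟩
        · exact absurd h' (List.splitOnP_ne_nil _ _)
        · simp [List.splitOnP_cons, hx, h']

theorem pvSplitOn_singleton (c : Char) (l : List Char) :
    PySem.Chars.splitOn l [c] = l.splitOn c := by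
  rw [PySem.Chars.splitOn, pvSplitOn_go_singleton c (l.length + 1) l [] [] (by omega)]
  rcases h' : l.splitOnP (· == c) with _ | ⟨q, qs⟩
  · exact absurd h' (List.splitOnP_ne_nil _ _)
  · simp [List.splitOn, h']

-- PySem's fueled substring counter, on a one-character pattern, is List.count.
theorem pvCount_go_singleton (c : Char) (fuel : Nat) :
    ∀ (l : List Char) (acc : Nat), l.length ≤ fuel →
      PySem.Chars.count.go [c] fuel l acc = acc + l.count c := by
  induction fuel with
  | zero =>
    intro l acc h
    have : l = [] := List.length_eq_zero_iff.mp (Nat.le_zero.mp h)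
    subst this
    simp [PySem.Chars.count.go]
  | succ n ih =>
    intro l acc h
    cases l with
    | nil => simp [PySem.Chars.count.go]
    | cons x rest =>
      simp only [PySem.Chars.count.go, List.isPrefixOf, Bool.and_true,
        List.length_cons, List.length_nil, List.drop_succ_cons, List.drop_zero]
      by_cases hx : x = c
      · subst hx
        rw [if_pos (by simp)]
        rw [ih rest (acc + 1) (by simpa using h)]
        simp
        omega
      · rw [if_neg (by simp [Ne.symm hx])]
        rw [ih rest acc (by simpa using h)]
        simp [hx]

theorem pvCount_singleton (c : Char) (l : List Char) :
    PySem.Chars.count l [c] = l.count c := by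
  rw [PySem.Chars.count]
  simp only [List.isEmpty_cons, if_false, Bool.false_eq_true]
  rw [pvCount_go_singleton c l.length l 0 (le_refl _)]
  omega

-- No piece produced by splitOn contains the separator.
theorem pvNotMem_of_mem_splitOn (c : Char) :
    ∀ (cs : List Char), ∀ p ∈ cs.splitOn c, c ∉ p := by
  intro cs
  induction cs with
  | nil => intro p hp; simp [List.splitOn_nil] at hp; simp [hp]
  | cons x xs ih =>
    intro p hp
    simp only [List.splitOn, List.splitOnP_cons] at hp ih
    by_cases hx : x = c
    · simp [hx] at hp
      rcases hp with hp | hp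
      · simp [hp]
      · exact ih p hp
    · simp [hx] at hp
      rcases h' : xs.splitOnP (· == c) with _ | ⟨q, qs⟩
      · exact absurd h' (List.splitOnP_ne_nil _ _)
      · rw [h'] at hp
        simp at hp
        rcases hp with hp | hp
        · subst hp
          intro hmem
          rcases List.mem_cons.mp hmem with h1 | h1
          · exact hx h1.symm
          · exact ih q (by rw [h']; exact List.mem_cons_self) h1
        · exact ih p (by rw [h']; exact List.mem_cons_of_mem _ hp)

theorem pvPyGet?_nat (cs : List Char) (n : Nat) :
    PySem.List.pyGet? cs (n : Int) = cs[n]? := by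
  simp [PySem.List.pyGet?, PySem.List.pyIdx?]
  split
  · simp
  · rename_i h
    rw [List.getElem?_eq_none (by omega)]
    simp

-- The heart of the proof: on a 17-character string the two checks agree.
theorem pvMain (cs : List Char) (h17 : cs.length = 17) :
    ((cs.splitOn '-').length = 3 ∧ ∀ p ∈ cs.splitOn '-', p.length = 5)
      ↔ (cs[5]? = some '-' ∧ cs[11]? = some '-' ∧ cs.count '-' = 2) := by
  constructor
  · rintro ⟨hlen, hall⟩
    rcases hsp : cs.splitOn '-' with _ | ⟨p1, _ | ⟨p2, _ | ⟨p3, _ | _⟩⟩⟩ <;>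
      rw [hsp] at hlen <;> simp at hlen
    have hdec : cs = p1 ++ '-' :: (p2 ++ '-' :: p3) := by
      have := List.intercalate_splitOn (xs := cs) (x := '-')
      rw [hsp] at this
      simpa [List.intercalate] using this.symm
    have h1 : p1.length = 5 := hall p1 (by rw [hsp]; simp)
    have h2 : p2.length = 5 := hall p2 (by rw [hsp]; simp)
    have h3 : p3.length = 5 := hall p3 (by rw [hsp]; simp)
    have hn1 : '-' ∉ p1 := pvNotMem_of_mem_splitOn '-' cs p1 (by rw [hsp]; simp)
    have hn2 : '-' ∉ p2 := pvNotMem_of_mem_splitOn '-' cs p2 (by rw [hsp]; simp)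
    have hn3 : '-' ∉ p3 := pvNotMem_of_mem_splitOn '-' cs p3 (by rw [hsp]; simp)
    subst hdec
    refine ⟨?_, ?_, ?_⟩
    · rw [List.getElem?_append_right (by omega)]
      simp [h1]
    · rw [List.getElem?_append_right (by omega)]
      simp only [h1]
      rw [show 11 - 5 = 6 by rfl, List.getElem?_cons_succ,
        List.getElem?_append_right (by omega)]
      simp [h2]
    · simp [List.count_append, List.count_eq_zero_of_not_mem hn1,
        List.count_eq_zero_of_not_mem hn2, List.count_eq_zero_of_not_mem hn3]
  · rintro ⟨g5, g11, gcnt⟩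
    set p1 := cs.take 5 with hp1
    set p2 := (cs.drop 6).take 5 with hp2
    set p3 := cs.drop 12 with hp3
    have h5 : 5 < cs.length := by omega
    have h11 : 11 < cs.length := by omega
    have c5 : cs[5]'h5 = '-' := by
      rw [List.getElem?_eq_getElem h5] at g5; exact Option.some.inj g5
    have c11 : cs[11]'h11 = '-' := by
      rw [List.getElem?_eq_getElem h11] at g11; exact Option.some.inj g11
    have e2 : cs.drop 5 = '-' :: cs.drop 6 := by
      rw [← List.getElem_cons_drop h5]; simp [c5]
    have e4 : cs.drop 11 = '-' :: cs.drop 12 := by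
      rw [← List.getElem_cons_drop h11]; simp [c11]
    have e3 : cs.drop 6 = (cs.drop 6).take 5 ++ cs.drop 11 := by
      conv_lhs => rw [← List.take_append_drop 5 (cs.drop 6)]
      rw [List.drop_drop]
    have hdec : cs = p1 ++ '-' :: (p2 ++ '-' :: p3) := by
      conv_lhs => rw [← List.take_append_drop 5 cs, e2, e3, e4]
    have hcnt : p1.count '-' + p2.count '-' + p3.count '-' = 0 := by
      rw [hdec] at gcnt
      simp [List.count_append] at gcnt
      omega
    have hn1 : '-' ∉ p1 := List.count_eq_zero.mp (by omega)
    have hn2 : '-' ∉ p2 := List.count_eq_zero.mp (by omega)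
    have hn3 : '-' ∉ p3 := List.count_eq_zero.mp (by omega)
    have hsp : cs.splitOn '-' = [p1, p2, p3] := by
      rw [hdec]
      unfold List.splitOn
      rw [List.splitOnP_first _ p1
          (fun x hx => by simp only [beq_iff_eq]; intro e; exact hn1 (e ▸ hx)) '-' (by simp),
        List.splitOnP_first _ p2
          (fun x hx => by simp only [beq_iff_eq]; intro e; exact hn2 (e ▸ hx)) '-' (by simp),
        List.splitOnP_eq_single _ p3
          (fun x hx => by simp only [beq_iff_eq]; intro e; exact hn3 (e ▸ hx))]
    rw [hsp]
    refine ⟨rfl, ?_⟩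
    intro p hp
    simp at hp
    have l1 : p1.length = 5 := by rw [hp1]; simp [h17]
    have l3 : p3.length = 5 := by rw [hp3]; simp [h17]
    have l2 : p2.length = 5 := by rw [hp2]; simp [h17]
    rcases hp with rfl | rfl | rfl <;> assumption

-- ===== VERDICT (by name: the statement is the Claim_ definition above) =====
theorem valid_steam_key_spec : Claim_equal_valid_steam_key := by
  intro key _
  unfold Spec_valid_steam_key valid_steam_key valid_steam_key_alt
  simp only [PySem.Str.len_eq, PySem.Str.pyGet?_eq, PySem.Chars.pyGet?_eq_listPyGet?,
    PySem.Str.count_eq, pvSplitOn_singleton]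
  rw [show "-".toList = ['-'] from rfl, pvCount_singleton,
    show (5:Int) = ((5:Nat):Int) from rfl, show (11:Int) = ((11:Nat):Int) from rfl,
    pvPyGet?_nat, pvPyGet?_nat]
  set cs := key.toList with hcs
  rw [Bool.eq_iff_iff]
  simp only [Bool.and_eq_true, beq_iff_eq, List.all_eq_true]
  constructor
  · rintro ⟨⟨hL, h3⟩, hall⟩
    have h17 : cs.length = 17 := by exact_mod_cast hL
    obtain ⟨g5, g11, gc⟩ := (pvMain cs h17).mp ⟨h3, fun p hp => hall p hp⟩
    exact ⟨⟨⟨hL, g5⟩, g11⟩, by exact_mod_cast gc⟩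
  · rintro ⟨⟨⟨hL, g5⟩, g11⟩, gc⟩
    have h17 : cs.length = 17 := by exact_mod_cast hL
    obtain ⟨h3, hall⟩ := (pvMain cs h17).mpr ⟨g5, g11, by exact_mod_cast gc⟩
    exact ⟨⟨hL, h3⟩, fun p hp => hall p hp⟩
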